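-- pv_equiv track=rewrite | github.com/sala0320/Algorithm | Greedy/BackJoon/1439.py | check
-- ===== SOURCE A (Python) =====
-- def check(string, char):
--     now_count = 0
--     count = 0
--     for s in string:
--         if s == char:
--             if now_count == 0:
--                 count += 1
--             now_count += 1
--         else:
--             now_count = 0
--
--     return count
-- ===== SOURCE B (Python) =====
-- def check(string, char):
--     # Group-skipping scan: consume one whole run of equal characters per
--     # outer step (inner loop skips the run), counting runs whose char matches.
--     count = 0
--     i = 0
--     n = len(string)
--     while i < n:
--         c = string[i]
--         j = i + 1
--         while j < n and string[j] == c: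
--             j += 1
--         if c == char:
--             count += 1
--         i = j
--     return count
-- ===== Notes on version B (the rewrite author's own statement) =====
-- stated objective: alternative
-- what changed: Replaces A's per-character run-start state machine (now_count flag) with a group-skipping scan: each outer step consumes one whole run of equal characters and counts it if its character equals char.
import Mathlib
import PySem

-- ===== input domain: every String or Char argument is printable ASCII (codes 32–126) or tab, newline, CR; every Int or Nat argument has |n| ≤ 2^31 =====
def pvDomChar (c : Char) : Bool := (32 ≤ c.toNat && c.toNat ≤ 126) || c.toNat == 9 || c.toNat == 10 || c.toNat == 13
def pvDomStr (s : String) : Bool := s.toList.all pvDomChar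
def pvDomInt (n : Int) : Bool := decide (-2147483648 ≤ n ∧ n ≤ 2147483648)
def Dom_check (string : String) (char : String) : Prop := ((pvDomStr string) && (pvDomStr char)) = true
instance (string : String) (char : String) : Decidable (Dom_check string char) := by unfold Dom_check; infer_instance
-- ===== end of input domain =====

-- B replaces A's per-character run-start state machine with a group-skipping scan
-- (one outer step per run of equal characters); alternative decomposition, same cost.


-- ===== PORT A =====
-- the for-loop with state (now_count, count), one step per character
def checkLoop (char : String) : List Char → Int → Int → Int
  | [], _, count => count
  | s :: rest, now_count, count =>
      if String.ofList [s] = char then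
        checkLoop char rest (now_count + 1) (if now_count = 0 then count + 1 else count)
      else
        checkLoop char rest 0 count

def check (string : String) (char : String) : Int :=
  checkLoop char string.toList 0 0

-- ===== PORT B =====
-- outer while loop over the remaining suffix; the inner while loop that skips
-- the rest of the current run is the dropWhile over equal characters
def altOuter (char : String) : List Char → Int → Int
  | [], count => count
  | c :: rest, count =>
      altOuter char (rest.dropWhile (· == c)) (if String.ofList [c] = char then count + 1 else count)
termination_by l _ => l.length
decreasing_by
  simpa using Nat.lt_succ_of_le (List.length_dropWhile_le _ _)

def check_alt (string : String) (char : String) : Int :=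
  altOuter char string.toList 0

-- ===== PRECONDITION & SPEC =====
def Spec_check (string : String) (char : String) (out : Int) : Prop := out = check_alt string char
instance (string : String) (char : String) (out : Int) : Decidable (Spec_check string char out) := by unfold Spec_check; infer_instance

-- ===== CLAIM (what is proved, stated in full; the proofs are below) =====
def Claim_equal_check : Prop := ∀ (string : String) (char : String), Dom_check string char → Spec_check string char (check string char)

-- ===== LEMMAS AND PROOFS =====

-- abstract count of run starts matching char, flag = "currently inside a run of char"
def fAux (char : String) : List Char → Bool → Int
  | [], _ => 0
  | c :: r, inRun =>
      if String.ofList [c] = char then (if inRun then 0 else 1) + fAux char r true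
      else fAux char r false

theorem checkLoop_eq (char : String) (l : List Char) :
    ∀ (now count : Int), 0 ≤ now →
      checkLoop char l now count = count + fAux char l (if now = 0 then false else true) := by
  induction l with
  | nil => intro now count _; simp [checkLoop, fAux]
  | cons c r ih =>
    intro now count hnow
    by_cases h : String.ofList [c] = char
    · have h1 : (0:Int) ≤ now + 1 := by omega
      have hne : ¬ (now + 1 = 0) := by omega
      rw [checkLoop, if_pos h, ih _ _ h1, fAux, if_pos h]
      by_cases h0 : now = 0 <;> · simp [h0, hne]; try ring
    · rw [checkLoop, if_neg h, ih 0 count le_rfl, fAux, if_neg h]; simp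

theorem fAux_true_dropWhile (char : String) (l : List Char) :
    fAux char l true = fAux char (l.dropWhile (fun c => decide (String.ofList [c] = char))) false := by
  induction l with
  | nil => simp [fAux]
  | cons c r ih =>
    by_cases h : String.ofList [c] = char
    · rw [fAux, if_pos h, List.dropWhile_cons_of_pos (by simpa using h)]
      simpa using ih
    · rw [List.dropWhile_cons_of_neg (by simpa using h), fAux, if_neg h, fAux, if_neg h]

theorem fAux_skip (char : String) (c : Char) (h : ¬ String.ofList [c] = char) (r : List Char) :
    fAux char (r.dropWhile (· == c)) false = fAux char r false := by
  induction r with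
  | nil => simp
  | cons d r' ih =>
    by_cases hd : d = c
    · rw [List.dropWhile_cons_of_pos (by simp [hd]), ih, fAux, if_neg (by rwa [hd])]
    · rw [List.dropWhile_cons_of_neg (by simp [hd])]

theorem altOuter_eq (char : String) (l : List Char) (count : Int) :
    altOuter char l count = count + fAux char l false := by
  induction l, count using altOuter.induct char with
  | case1 count => simp [altOuter, fAux]
  | case2 c rest count ih =>
    simp only [dite_eq_ite] at ih
    rw [altOuter, ih]
    by_cases h : String.ofList [c] = char
    · have hpred : (fun d => d == c) = (fun d => decide (String.ofList [d] = char)) := by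
        funext d
        have : (String.ofList [d] = char) ↔ (d = c) := by
          rw [← h]; constructor
          · intro hh
            have := congrArg String.toList hh
            rw [String.toList_ofList, String.toList_ofList, List.cons.injEq] at this
            exact this.1
          · intro hh; rw [hh]
        simp [this, Bool.beq_eq_decide_eq]
      rw [if_pos h, fAux, if_pos h, fAux_true_dropWhile, hpred]
      simp; ring
    · rw [if_neg h, fAux, if_neg h, fAux_skip char c h rest]

-- ===== VERDICT (by name: the statement is the Claim_ definition above) =====
theorem check_spec : Claim_equal_check := by
  intro string char _
  show check string char = check_alt string char
  rw [check, check_alt, checkLoop_eq char _ 0 0 le_rfl, altOuter_eq]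
  simp
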